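-- pv_equiv track=rewrite | github.com/Benjaminslakey/algorithms-and-data-structures | leetcode/Graph/max_island.py | bfs
-- ===== SOURCE A (Python) =====
-- from collections import deque
--
-- def get_neighbors(vertex, graph):
--     neighbors = []
--     left_bound = -1
--     top_bound, bottom_bound = -1, len(graph)
--     r, c = vertex
--     for direction in [(0, 1), (0, -1), (1, 0), (-1, 0)]:
--         delta_r, delta_c = direction
--         neighbor = (r + delta_r, c + delta_c)
--         nr, nc = neighbor
--         if top_bound < nr < bottom_bound and left_bound < nc < len(graph[nr]) and graph[nr][nc] == "L":
--             neighbors.append(neighbor)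
--     return neighbors
--
-- def bfs(island_map, vertex, visited) -> int:
--     queue = deque([vertex])
--     discovered = {vertex}
--     while queue:
--         current = queue.popleft()
--         for neighbor in get_neighbors(current, island_map):
--             if neighbor not in visited:
--                 queue.append(neighbor)
--                 discovered.add(neighbor)
--                 visited.add(neighbor)
--     return len(discovered)
-- ===== SOURCE B (Python) =====
-- def get_neighbors(vertex, graph):
--     neighbors = []
--     left_bound = -1
--     top_bound, bottom_bound = -1, len(graph)
--     r, c = vertex
--     for direction in [(0, 1), (0, -1), (1, 0), (-1, 0)]:
--         delta_r, delta_c = direction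
--         neighbor = (r + delta_r, c + delta_c)
--         nr, nc = neighbor
--         if top_bound < nr < bottom_bound and left_bound < nc < len(graph[nr]) and graph[nr][nc] == "L":
--             neighbors.append(neighbor)
--     return neighbors
--
-- def bfs(island_map, vertex, visited) -> int:
--     # Round-based saturation (no queue/stack): repeatedly sweep the current
--     # seen set, adding unvisited neighbors, until a full sweep adds nothing.
--     seen = {vertex}
--     changed = True
--     while changed:
--         changed = False
--         for cell in list(seen):
--             for n in get_neighbors(cell, island_map):
--                 if n not in seen and n not in visited:
--                     seen.add(n)
--                     visited.add(n)
--                     changed = True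
--     return len(seen)
-- ===== Notes on version B (the rewrite author's own statement) =====
-- stated objective: alternative
-- what changed: Replaces the deque-based BFS with a worklist-free fixpoint saturation: B keeps a 'seen' set and repeatedly sweeps it, adding each not-yet-visited neighbor, until a whole sweep adds nothing, then returns len(seen); no queue, no per-cell scheduling (both functions mutate the caller's visited set; the equality proved is about the return value only — A may additionally re-insert the start cell into visited, B never does).
import Mathlib
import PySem

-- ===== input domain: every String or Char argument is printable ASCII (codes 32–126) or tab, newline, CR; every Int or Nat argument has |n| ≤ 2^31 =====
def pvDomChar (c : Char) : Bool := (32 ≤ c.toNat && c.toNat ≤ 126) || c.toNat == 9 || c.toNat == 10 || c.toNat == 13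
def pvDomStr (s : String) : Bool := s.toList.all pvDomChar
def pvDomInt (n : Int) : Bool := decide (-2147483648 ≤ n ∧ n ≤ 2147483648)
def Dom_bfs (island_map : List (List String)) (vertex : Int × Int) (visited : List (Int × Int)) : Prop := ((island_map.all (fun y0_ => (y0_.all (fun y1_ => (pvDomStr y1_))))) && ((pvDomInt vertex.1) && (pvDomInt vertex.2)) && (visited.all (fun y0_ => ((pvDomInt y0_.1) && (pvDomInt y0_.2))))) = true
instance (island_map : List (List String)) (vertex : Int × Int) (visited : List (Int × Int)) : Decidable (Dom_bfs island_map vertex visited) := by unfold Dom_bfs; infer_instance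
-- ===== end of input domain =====

-- B replaces the deque-BFS + 'discovered' set with a worklist-free fixpoint saturation (repeated
-- sweeps of a 'seen' set until a sweep adds nothing); return values proved equal — both Pythons
-- mutate `visited` (A may additionally re-insert the start cell there, B never does).


-- ===== PORT A =====
-- shared module helper get_neighbors (used verbatim by both A and B)
def getNeighbors (vertex : Int × Int) (graph : List (List String)) : List (Int × Int) :=
  ([((0:Int),(1:Int)), (0,-1), (1,0), (-1,0)]).foldl (fun neighbors direction =>
    let nr := vertex.1 + direction.1
    let nc := vertex.2 + direction.2
    if (-1 < nr ∧ nr < (graph.length : Int)) ∧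
       (-1 < nc ∧ nc < ((PySem.List.pyGetD graph nr []).length : Int)) ∧
       PySem.List.pyGetD (PySem.List.pyGetD graph nr []) nc "" = "L"
    then neighbors ++ [(nr, nc)] else neighbors) []

-- termination bookkeeping: the grid cells, and how many are not yet in a given set
def allCells (g : List (List String)) : List (Int × Int) :=
  (List.range g.length).flatMap (fun r => (List.range (g.getD r []).length).map (fun c => (Int.ofNat r, Int.ofNat c)))

def freeCount (g : List (List String)) (vis : List (Int × Int)) : Nat :=
  (allCells g).countP (fun x => decide (x ∉ vis))

lemma countP_lt_of_strict {α : Type} {l : List α} {p q : α → Bool} (h : ∀ a ∈ l, p a → q a)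
    {x : α} (hx : x ∈ l) (hq : q x) (hp : ¬ p x) : l.countP p < l.countP q := by
  induction l with
  | nil => cases hx
  | cons a l ih =>
    rcases List.mem_cons.1 hx with rfl | hx'
    · have h1 : List.countP p (x :: l) = List.countP p l := by simp [hp]
      have h2 : List.countP q (x :: l) = List.countP q l + 1 := by simp [hq]
      have := List.countP_mono_left (l := l) (fun a ha hpa => h a (List.mem_cons_of_mem _ ha) hpa)
      omega
    · have := ih (fun a ha hpa => h a (List.mem_cons_of_mem _ ha) hpa) hx'
      by_cases hpa : p a
      · have hqa : q a := h a (List.mem_cons_self) hpa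
        have h1 : List.countP p (a :: l) = List.countP p l + 1 := by simp [hpa]
        have h2 : List.countP q (a :: l) = List.countP q l + 1 := by simp [hqa]
        omega
      · have h1 : List.countP p (a :: l) = List.countP p l := by simp [hpa]
        have h2 : List.countP q l ≤ List.countP q (a :: l) := by
          simp only [List.countP_cons]; omega
        omega

lemma nbrs_sub_allCells (c : Int × Int) (g : List (List String)) :
    ∀ n ∈ getNeighbors c g, n ∈ allCells g := by
  intro n hn
  simp only [getNeighbors, List.foldl] at hn
  have hmem : ∀ (acc : List (Int × Int)) (nr nc : Int),
      n ∈ (if (-1 < nr ∧ nr < (g.length : Int)) ∧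
            (-1 < nc ∧ nc < ((PySem.List.pyGetD g nr []).length : Int)) ∧
            PySem.List.pyGetD (PySem.List.pyGetD g nr []) nc "" = "L"
           then acc ++ [(nr, nc)] else acc) → n ∈ acc ∨ n ∈ allCells g := by
    intro acc nr nc hin
    split_ifs at hin with hcond
    · rcases List.mem_append.1 hin with h | h
      · exact Or.inl h
      · right
        obtain ⟨⟨hr1, hr2⟩, ⟨hc1, hc2⟩, _hL⟩ := hcond
        have hn' : n = (nr, nc) := by simpa using h
        subst hn'
        have hltr : nr.toNat < g.length := by omega
        have h1 : PySem.List.pyGetD g nr [] = g[nr.toNat] :=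
          PySem.List.pyGetD_eq_getElem g [] (by omega) (by exact_mod_cast hr2)
        have h2 : g.getD nr.toNat [] = g[nr.toNat] := List.getD_eq_getElem g [] hltr
        rw [h1] at hc2
        have h3 : nc.toNat < (g.getD nr.toNat []).length := by rw [h2]; omega
        have hmem2 : (Int.ofNat nr.toNat, Int.ofNat nc.toNat) ∈ allCells g := by
          unfold allCells
          rw [List.mem_flatMap]
          exact ⟨nr.toNat, List.mem_range.2 hltr, List.mem_map_of_mem (List.mem_range.2 h3)⟩
        have h4 : (Int.ofNat nr.toNat, Int.ofNat nc.toNat) = (nr, nc) := by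
          simp only [Int.ofNat_eq_natCast]
          rw [Int.toNat_of_nonneg (by omega : (0:Int) ≤ nr),
              Int.toNat_of_nonneg (by omega : (0:Int) ≤ nc)]
        exact h4 ▸ hmem2
    · exact Or.inl hin
  rcases hmem _ _ _ hn with h | h
  · rcases hmem _ _ _ h with h | h
    · rcases hmem _ _ _ h with h | h
      · rcases hmem _ _ _ h with h | h
        · cases h
        · exact h
      · exact h
    · exact h
  · exact h

lemma freeCount_add_lt (g : List (List String)) (vis : List (Int × Int)) (x : Int × Int)
    (hx : x ∈ allCells g) (hnx : x ∉ vis) :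
    freeCount g (PySem.Set.add vis x) < freeCount g vis := by
  unfold freeCount
  refine countP_lt_of_strict (fun a _ hpa => ?_) hx (by simp [hnx]) (by simp [PySem.Set.mem_add])
  simp only [decide_eq_true_eq, PySem.Set.mem_add] at hpa ⊢
  intro ha; exact hpa (Or.inl ha)

-- the inner 'for neighbor in get_neighbors(current, island_map)' loop of A
def bfsStep (g : List (List String)) (ns q d vis : List (Int × Int)) :
    List (Int × Int) × List (Int × Int) × List (Int × Int) :=
  match ns with
  | [] => (q, d, vis)
  | n :: rest =>
    if n ∈ vis then bfsStep g rest q d vis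
    else bfsStep g rest (q ++ [n]) (PySem.Set.add d n) (PySem.Set.add vis n)

lemma bfsStep_term (g : List (List String)) :
    ∀ (ns q d vis : List (Int × Int)), (∀ n ∈ ns, n ∈ allCells g) →
      bfsStep g ns q d vis = (q, d, vis) ∨
      freeCount g (bfsStep g ns q d vis).2.2 < freeCount g vis := by
  intro ns
  induction ns with
  | nil => intro q d vis _; left; rfl
  | cons n rest ih =>
    intro q d vis h
    by_cases hn : n ∈ vis
    · simpa [bfsStep, hn] using ih q d vis (fun m hm => h m (List.mem_cons_of_mem _ hm))
    · right
      have hlt : freeCount g (PySem.Set.add vis n) < freeCount g vis :=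
        freeCount_add_lt g vis n (h n List.mem_cons_self) hn
      rcases ih (q ++ [n]) (PySem.Set.add d n) (PySem.Set.add vis n)
          (fun m hm => h m (List.mem_cons_of_mem _ hm)) with he | hlt2
      · simp only [bfsStep, if_neg hn, he]; exact hlt
      · simp only [bfsStep, if_neg hn]; exact hlt2.trans hlt

-- the 'while queue' loop of A (returns the final discovered set)
def bfsLoop (g : List (List String)) (q d vis : List (Int × Int)) : List (Int × Int) :=
  match q with
  | [] => d
  | current :: rest =>
    bfsLoop g (bfsStep g (getNeighbors current g) rest d vis).1
              (bfsStep g (getNeighbors current g) rest d vis).2.1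
              (bfsStep g (getNeighbors current g) rest d vis).2.2
termination_by (freeCount g vis, q.length)
decreasing_by
  rcases bfsStep_term g (getNeighbors current g) rest d vis
      (nbrs_sub_allCells current g) with he | hlt
  · rw [he]; exact Prod.Lex.right _ (by simp)
  · exact Prod.Lex.left _ _ hlt

def bfs (island_map : List (List String)) (vertex : Int × Int) (visited : List (Int × Int)) : Int :=
  ((bfsLoop island_map [vertex] (PySem.Set.ofList [vertex]) visited).length : Int)

-- ===== PORT B =====
-- innermost loop of B: 'for n in get_neighbors(cell, island_map)' — grow seen/vis, raise the flag
def sweepNs (ns seen vis : List (Int × Int)) (changed : Bool) :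
    List (Int × Int) × List (Int × Int) × Bool :=
  match ns with
  | [] => (seen, vis, changed)
  | n :: rest =>
    if n ∉ seen ∧ n ∉ vis then
      sweepNs rest (PySem.Set.add seen n) (PySem.Set.add vis n) true
    else sweepNs rest seen vis changed

-- one sweep of B: 'for cell in list(seen)' over the round's snapshot
def sweep (g : List (List String)) (cells seen vis : List (Int × Int)) (changed : Bool) :
    List (Int × Int) × List (Int × Int) × Bool :=
  match cells with
  | [] => (seen, vis, changed)
  | c :: rest =>
    sweep g rest (sweepNs (getNeighbors c g) seen vis changed).1
                 (sweepNs (getNeighbors c g) seen vis changed).2.1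
                 (sweepNs (getNeighbors c g) seen vis changed).2.2

lemma sweepNs_measure (g : List (List String)) :
    ∀ (ns seen vis : List (Int × Int)) (ch : Bool), (∀ n ∈ ns, n ∈ allCells g) →
      freeCount g (sweepNs ns seen vis ch).1 ≤ freeCount g seen ∧
      (ch = false → (sweepNs ns seen vis ch).2.2 = true →
        freeCount g (sweepNs ns seen vis ch).1 < freeCount g seen) := by
  intro ns
  induction ns with
  | nil =>
    intro seen vis ch _
    refine ⟨le_refl _, fun hch hres => ?_⟩
    simp [sweepNs, hch] at hres
  | cons n rest ih =>
    intro seen vis ch h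
    by_cases hn : n ∉ seen ∧ n ∉ vis
    · have hlt : freeCount g (PySem.Set.add seen n) < freeCount g seen :=
        freeCount_add_lt g seen n (h n List.mem_cons_self) hn.1
      have hle := (ih (PySem.Set.add seen n) (PySem.Set.add vis n) true
        (fun m hm => h m (List.mem_cons_of_mem _ hm))).1
      have : freeCount g (sweepNs (n :: rest) seen vis ch).1 < freeCount g seen := by
        simp only [sweepNs, if_pos hn]; omega
      exact ⟨le_of_lt this, fun _ _ => this⟩
    · have := ih seen vis ch (fun m hm => h m (List.mem_cons_of_mem _ hm))
      simpa only [sweepNs, if_neg hn] using this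

lemma sweep_measure (g : List (List String)) :
    ∀ (cells seen vis : List (Int × Int)) (ch : Bool),
      freeCount g (sweep g cells seen vis ch).1 ≤ freeCount g seen ∧
      (ch = false → (sweep g cells seen vis ch).2.2 = true →
        freeCount g (sweep g cells seen vis ch).1 < freeCount g seen) := by
  intro cells
  induction cells with
  | nil =>
    intro seen vis ch
    refine ⟨le_refl _, fun hch hres => ?_⟩
    simp [sweep, hch] at hres
  | cons c rest ih =>
    intro seen vis ch
    have hns := sweepNs_measure g (getNeighbors c g) seen vis ch (nbrs_sub_allCells c g)
    have hrest := ih (sweepNs (getNeighbors c g) seen vis ch).1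
      (sweepNs (getNeighbors c g) seen vis ch).2.1 (sweepNs (getNeighbors c g) seen vis ch).2.2
    refine ⟨?_, ?_⟩
    · simp only [sweep]; exact hrest.1.trans hns.1
    · intro hch hres
      simp only [sweep] at hres
      by_cases hb : (sweepNs (getNeighbors c g) seen vis ch).2.2 = true
      · have := hns.2 hch hb
        simp only [sweep]; omega
      · have hb' : (sweepNs (getNeighbors c g) seen vis ch).2.2 = false := by
          simpa using hb
        have := hrest.2 hb' hres
        simp only [sweep]; omega

-- the 'while changed' loop of B: sweep the snapshot; repeat while something was added
def saturate (g : List (List String)) (seen vis : List (Int × Int)) :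
    List (Int × Int) × List (Int × Int) :=
  if (sweep g seen seen vis false).2.2 then
    saturate g (sweep g seen seen vis false).1 (sweep g seen seen vis false).2.1
  else ((sweep g seen seen vis false).1, (sweep g seen seen vis false).2.1)
termination_by freeCount g seen
decreasing_by
  exact (sweep_measure g seen seen vis false).2 rfl (by assumption)

def bfs_alt (island_map : List (List String)) (vertex : Int × Int) (visited : List (Int × Int)) : Int :=
  (((saturate island_map (PySem.Set.ofList [vertex]) visited).1).length : Int)

-- ===== PRECONDITION & SPEC =====
def Spec_bfs (island_map : List (List String)) (vertex : Int × Int) (visited : List (Int × Int)) (out : Int) : Prop := out = bfs_alt island_map vertex visited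
instance (island_map : List (List String)) (vertex : Int × Int) (visited : List (Int × Int)) (out : Int) : Decidable (Spec_bfs island_map vertex visited out) := by unfold Spec_bfs; infer_instance

-- ===== CLAIM (what is proved, stated in full; the proofs are below) =====
def Claim_equal_bfs : Prop := ∀ (island_map : List (List String)) (vertex : Int × Int) (visited : List (Int × Int)), Dom_bfs island_map vertex visited → Spec_bfs island_map vertex visited (bfs island_map vertex visited)

-- ===== LEMMAS AND PROOFS =====

-- cells discoverable from v: reachable through land cells not in the initial visited set V₀
inductive Reach (g : List (List String)) (v : Int × Int) (V₀ : List (Int × Int)) : Int × Int → Prop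
  | base (n : Int × Int) : n ∈ getNeighbors v g → n ∉ V₀ → Reach g v V₀ n
  | step (c n : Int × Int) : Reach g v V₀ c → n ∈ getNeighbors c g → n ∉ V₀ → Reach g v V₀ n

lemma bfsStep_spec (g : List (List String)) (v : Int × Int) (V₀ : List (Int × Int))
    (current : Int × Int) (hcur : current = v ∨ Reach g v V₀ current) :
    ∀ (ns q d vis : List (Int × Int)),
    (∀ n ∈ ns, n ∈ getNeighbors current g) →
    d.Nodup → (∀ x ∈ d, x = v ∨ Reach g v V₀ x) →
    (∀ x ∈ vis, x ∈ V₀ ∨ x ∈ d) → (∀ x ∈ V₀, x ∈ vis) →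
    (∀ x ∈ q, x ∈ (bfsStep g ns q d vis).1) ∧
    (∀ x ∈ d, x ∈ (bfsStep g ns q d vis).2.1) ∧
    (∀ x ∈ vis, x ∈ (bfsStep g ns q d vis).2.2) ∧
    (∀ x ∈ (bfsStep g ns q d vis).1, x ∈ q ∨ x ∈ (bfsStep g ns q d vis).2.1) ∧
    (bfsStep g ns q d vis).2.1.Nodup ∧
    (∀ x ∈ (bfsStep g ns q d vis).2.1, x = v ∨ Reach g v V₀ x) ∧
    (∀ x ∈ (bfsStep g ns q d vis).2.2, x ∈ V₀ ∨ x ∈ (bfsStep g ns q d vis).2.1) ∧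
    (∀ x ∈ V₀, x ∈ (bfsStep g ns q d vis).2.2) ∧
    (∀ n ∈ ns, n ∈ (bfsStep g ns q d vis).2.2) ∧
    (∀ x ∈ (bfsStep g ns q d vis).2.1, x ∈ d ∨ x ∈ (bfsStep g ns q d vis).1) := by
  intro ns
  induction ns with
  | nil =>
    intro q d vis _ h2 h3 h4 h5
    refine ⟨fun x hx => hx, fun x hx => hx, fun x hx => hx, fun x hx => Or.inl hx, h2, h3,
      h4, h5, fun n hn => absurd hn (List.not_mem_nil), fun x hx => Or.inl hx⟩
  | cons n rest ih =>
    intro q d vis hns h2 h3 h4 h5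
    by_cases hn : n ∈ vis
    · have hrw : bfsStep g (n :: rest) q d vis = bfsStep g rest q d vis := by
        simp [bfsStep, hn]
      rw [hrw]
      obtain ⟨c1, c2, c3, c4, c5, c6, c7, c8, c9, c10⟩ :=
        ih q d vis (fun m hm => hns m (List.mem_cons_of_mem _ hm)) h2 h3 h4 h5
      exact ⟨c1, c2, c3, c4, c5, c6, c7, c8,
        fun m hm => by
          rcases List.mem_cons.1 hm with rfl | hm'
          · exact c3 m hn
          · exact c9 m hm', c10⟩
    · have hrw : bfsStep g (n :: rest) q d vis
          = bfsStep g rest (q ++ [n]) (PySem.Set.add d n) (PySem.Set.add vis n) := by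
        simp [bfsStep, hn]
      rw [hrw]
      have hnV : n ∉ V₀ := fun hm => hn (h5 n hm)
      have hnReach : n = v ∨ Reach g v V₀ n := by
        rcases hcur with rfl | hc
        · exact Or.inr (Reach.base n (hns n List.mem_cons_self) hnV)
        · exact Or.inr (Reach.step current n hc (hns n List.mem_cons_self) hnV)
      obtain ⟨c1, c2, c3, c4, c5, c6, c7, c8, c9, c10⟩ :=
        ih (q ++ [n]) (PySem.Set.add d n) (PySem.Set.add vis n)
          (fun m hm => hns m (List.mem_cons_of_mem _ hm))
          (PySem.Set.nodup_add _ _ h2)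
          (fun x hx => by
            rcases (PySem.Set.mem_add _ _ _).1 hx with hx' | rfl
            · exact h3 x hx'
            · exact hnReach)
          (fun x hx => by
            rcases (PySem.Set.mem_add _ _ _).1 hx with hx' | rfl
            · rcases h4 x hx' with h | h
              · exact Or.inl h
              · exact Or.inr ((PySem.Set.mem_add _ _ _).2 (Or.inl h))
            · exact Or.inr ((PySem.Set.mem_add _ _ _).2 (Or.inr rfl)))
          (fun x hx => (PySem.Set.mem_add _ _ _).2 (Or.inl (h5 x hx)))
      refine ⟨fun x hx => c1 x (List.mem_append_left _ hx),
        fun x hx => c2 x ((PySem.Set.mem_add _ _ _).2 (Or.inl hx)),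
        fun x hx => c3 x ((PySem.Set.mem_add _ _ _).2 (Or.inl hx)),
        fun x hx => ?_, c5, c6, c7, c8, fun m hm => ?_, fun x hx => ?_⟩
      · rcases c4 x hx with h | h
        · rcases List.mem_append.1 h with h' | h'
          · exact Or.inl h'
          · have : x = n := by simpa using h'
            subst this
            exact Or.inr (c2 x ((PySem.Set.mem_add _ _ _).2 (Or.inr rfl)))
        · exact Or.inr h
      · rcases List.mem_cons.1 hm with rfl | hm'
        · exact c3 m ((PySem.Set.mem_add _ _ _).2 (Or.inr rfl))
        · exact c9 m hm'
      · rcases c10 x hx with h | h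
        · rcases (PySem.Set.mem_add _ _ _).1 h with h' | rfl
          · exact Or.inl h'
          · exact Or.inr (c1 x (List.mem_append_right _ (by simp)))
        · exact Or.inr h

lemma bfsLoop_spec (g : List (List String)) (v : Int × Int) (V₀ : List (Int × Int)) :
    ∀ (q d vis : List (Int × Int)),
    (∀ x ∈ q, x ∈ d) → d.Nodup → (∀ x ∈ d, x = v ∨ Reach g v V₀ x) →
    (∀ x ∈ vis, x ∈ V₀ ∨ x ∈ d) → (∀ x ∈ V₀, x ∈ vis) →
    (∀ x ∈ d, x ∈ q ∨ ∀ n ∈ getNeighbors x g, n ∈ vis) →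
    (bfsLoop g q d vis).Nodup ∧
    (∀ x ∈ d, x ∈ bfsLoop g q d vis) ∧
    (∀ x ∈ bfsLoop g q d vis, x = v ∨ Reach g v V₀ x) ∧
    (∀ x ∈ bfsLoop g q d vis, ∀ n ∈ getNeighbors x g, n ∈ V₀ ∨ n ∈ bfsLoop g q d vis) := by
  intro q d vis
  fun_induction bfsLoop g q d vis with
  | case1 d vis =>
    intro h1 h2 h3 h4 h5 h6
    refine ⟨h2, fun x hx => hx, h3, fun x hx n hn => ?_⟩
    rcases h6 x hx with h | h
    · exact absurd h (List.not_mem_nil)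
    · exact h4 n (h n hn)
  | case2 d vis current rest ih =>
    intro h1 h2 h3 h4 h5 h6
    have hcur : current = v ∨ Reach g v V₀ current := h3 current (h1 current List.mem_cons_self)
    obtain ⟨c1, c2, c3, c4, c5, c6, c7, c8, c9, c10⟩ :=
      bfsStep_spec g v V₀ current hcur (getNeighbors current g) rest d vis
        (fun n hn => hn) h2 h3 h4 h5
    have H1' : ∀ x ∈ (bfsStep g (getNeighbors current g) rest d vis).1,
        x ∈ (bfsStep g (getNeighbors current g) rest d vis).2.1 := by
      intro x hx
      rcases c4 x hx with h | h
      · exact c2 x (h1 x (List.mem_cons_of_mem _ h))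
      · exact h
    have H6' : ∀ x ∈ (bfsStep g (getNeighbors current g) rest d vis).2.1,
        x ∈ (bfsStep g (getNeighbors current g) rest d vis).1 ∨
        ∀ n ∈ getNeighbors x g, n ∈ (bfsStep g (getNeighbors current g) rest d vis).2.2 := by
      intro x hx
      rcases c10 x hx with hxd | hxq
      · rcases h6 x hxd with hq | hv
        · rcases List.mem_cons.1 hq with rfl | hrest
          · exact Or.inr (fun n hn => c9 n hn)
          · exact Or.inl (c1 x hrest)
        · exact Or.inr (fun n hn => c3 n (hv n hn))
      · exact Or.inl hxq
    obtain ⟨D1, D2, D3, D4⟩ := ih H1' c5 c6 c7 c8 H6'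
    exact ⟨D1, fun x hx => D2 x (c2 x hx), D3, D4⟩

-- B-side: a sweep whose flag stays false changed nothing and certifies local closure
lemma sweepNs_true : ∀ (ns seen vis : List (Int × Int)),
    (sweepNs ns seen vis true).2.2 = true := by
  intro ns
  induction ns with
  | nil => intro seen vis; rfl
  | cons n rest ih =>
    intro seen vis
    by_cases hn : n ∉ seen ∧ n ∉ vis
    · simp only [sweepNs, if_pos hn]; exact ih _ _
    · simp only [sweepNs, if_neg hn]; exact ih _ _

lemma sweepNs_nochange : ∀ (ns seen vis : List (Int × Int)),
    (sweepNs ns seen vis false).2.2 = false →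
    (sweepNs ns seen vis false).1 = seen ∧ (sweepNs ns seen vis false).2.1 = vis ∧
    ∀ n ∈ ns, n ∈ seen ∨ n ∈ vis := by
  intro ns
  induction ns with
  | nil =>
    intro seen vis _
    exact ⟨rfl, rfl, fun n hn => absurd hn (List.not_mem_nil)⟩
  | cons n rest ih =>
    intro seen vis hres
    by_cases hn : n ∉ seen ∧ n ∉ vis
    · exfalso
      have : (sweepNs (n :: rest) seen vis false).2.2 = true := by
        simp only [sweepNs, if_pos hn]; exact sweepNs_true _ _ _
      rw [this] at hres; cases hres
    · have hres' : (sweepNs rest seen vis false).2.2 = false := by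
        simpa only [sweepNs, if_neg hn] using hres
      obtain ⟨e1, e2, e3⟩ := ih seen vis hres'
      refine ⟨by simpa only [sweepNs, if_neg hn] using e1,
              by simpa only [sweepNs, if_neg hn] using e2, fun m hm => ?_⟩
      rcases List.mem_cons.1 hm with rfl | hm'
      · by_cases hs : m ∈ seen
        · exact Or.inl hs
        · right; by_contra hv; exact hn ⟨hs, hv⟩
      · exact e3 m hm'

lemma sweep_true (g : List (List String)) : ∀ (cells seen vis : List (Int × Int)),
    (sweep g cells seen vis true).2.2 = true := by
  intro cells
  induction cells with
  | nil => intro seen vis; rfl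
  | cons c rest ih =>
    intro seen vis
    simp only [sweep, sweepNs_true]
    exact ih _ _

lemma sweep_nochange (g : List (List String)) : ∀ (cells seen vis : List (Int × Int)),
    (sweep g cells seen vis false).2.2 = false →
    (sweep g cells seen vis false).1 = seen ∧ (sweep g cells seen vis false).2.1 = vis ∧
    ∀ c ∈ cells, ∀ n ∈ getNeighbors c g, n ∈ seen ∨ n ∈ vis := by
  intro cells
  induction cells with
  | nil =>
    intro seen vis _
    exact ⟨rfl, rfl, fun c hc => absurd hc (List.not_mem_nil)⟩
  | cons c rest ih =>
    intro seen vis hres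
    by_cases hb : (sweepNs (getNeighbors c g) seen vis false).2.2 = true
    · exfalso
      have : (sweep g (c :: rest) seen vis false).2.2 = true := by
        simp only [sweep, hb]; exact sweep_true g _ _ _
      rw [this] at hres; cases hres
    · have hb' : (sweepNs (getNeighbors c g) seen vis false).2.2 = false := by simpa using hb
      obtain ⟨e1, e2, e3⟩ := sweepNs_nochange (getNeighbors c g) seen vis hb'
      have hres' : (sweep g rest seen vis false).2.2 = false := by
        simpa only [sweep, e1, e2, hb'] using hres
      obtain ⟨f1, f2, f3⟩ := ih seen vis hres'
      refine ⟨?_, ?_, fun m hm => ?_⟩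
      · simpa only [sweep, e1, e2, hb'] using f1
      · simpa only [sweep, e1, e2, hb'] using f2
      · rcases List.mem_cons.1 hm with rfl | hm'
        · exact fun n hn => e3 n hn
        · exact f3 m hm'

-- B-side: one sweepNs call preserves the saturation invariants and only grows seen
lemma sweepNs_pres (g : List (List String)) (v : Int × Int) (V₀ : List (Int × Int))
    (current : Int × Int) (hcur : current = v ∨ Reach g v V₀ current) :
    ∀ (ns seen vis : List (Int × Int)) (ch : Bool),
    (∀ n ∈ ns, n ∈ getNeighbors current g) →
    seen.Nodup → (∀ x ∈ seen, x = v ∨ Reach g v V₀ x) →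
    (∀ x ∈ vis, x ∈ V₀ ∨ x ∈ seen) → (∀ x ∈ V₀, x ∈ vis) →
    (sweepNs ns seen vis ch).1.Nodup ∧
    (∀ x ∈ seen, x ∈ (sweepNs ns seen vis ch).1) ∧
    (∀ x ∈ (sweepNs ns seen vis ch).1, x = v ∨ Reach g v V₀ x) ∧
    (∀ x ∈ (sweepNs ns seen vis ch).2.1, x ∈ V₀ ∨ x ∈ (sweepNs ns seen vis ch).1) ∧
    (∀ x ∈ V₀, x ∈ (sweepNs ns seen vis ch).2.1) := by
  intro ns
  induction ns with
  | nil =>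
    intro seen vis ch _ h2 h3 h4 h5
    exact ⟨h2, fun x hx => hx, h3, h4, h5⟩
  | cons n rest ih =>
    intro seen vis ch hns h2 h3 h4 h5
    by_cases hn : n ∉ seen ∧ n ∉ vis
    · have hnV : n ∉ V₀ := fun hm => hn.2 (h5 n hm)
      have hnReach : n = v ∨ Reach g v V₀ n := by
        rcases hcur with rfl | hc
        · exact Or.inr (Reach.base n (hns n List.mem_cons_self) hnV)
        · exact Or.inr (Reach.step current n hc (hns n List.mem_cons_self) hnV)
      have := ih (PySem.Set.add seen n) (PySem.Set.add vis n) true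
        (fun m hm => hns m (List.mem_cons_of_mem _ hm))
        (PySem.Set.nodup_add _ _ h2)
        (fun x hx => by
          rcases (PySem.Set.mem_add _ _ _).1 hx with hx' | rfl
          · exact h3 x hx'
          · exact hnReach)
        (fun x hx => by
          rcases (PySem.Set.mem_add _ _ _).1 hx with hx' | rfl
          · rcases h4 x hx' with h | h
            · exact Or.inl h
            · exact Or.inr ((PySem.Set.mem_add _ _ _).2 (Or.inl h))
          · exact Or.inr ((PySem.Set.mem_add _ _ _).2 (Or.inr rfl)))
        (fun x hx => (PySem.Set.mem_add _ _ _).2 (Or.inl (h5 x hx)))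
      obtain ⟨c1, c2, c3, c4, c5⟩ := this
      simp only [sweepNs, if_pos hn]
      exact ⟨c1, fun x hx => c2 x ((PySem.Set.mem_add _ _ _).2 (Or.inl hx)), c3, c4, c5⟩
    · have := ih seen vis ch (fun m hm => hns m (List.mem_cons_of_mem _ hm)) h2 h3 h4 h5
      simpa only [sweepNs, if_neg hn] using this

-- B-side: a whole sweep preserves the invariants and only grows seen
lemma sweep_pres (g : List (List String)) (v : Int × Int) (V₀ : List (Int × Int)) :
    ∀ (cells seen vis : List (Int × Int)) (ch : Bool),
    (∀ c ∈ cells, c = v ∨ Reach g v V₀ c) →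
    seen.Nodup → (∀ x ∈ seen, x = v ∨ Reach g v V₀ x) →
    (∀ x ∈ vis, x ∈ V₀ ∨ x ∈ seen) → (∀ x ∈ V₀, x ∈ vis) →
    (sweep g cells seen vis ch).1.Nodup ∧
    (∀ x ∈ seen, x ∈ (sweep g cells seen vis ch).1) ∧
    (∀ x ∈ (sweep g cells seen vis ch).1, x = v ∨ Reach g v V₀ x) ∧
    (∀ x ∈ (sweep g cells seen vis ch).2.1, x ∈ V₀ ∨ x ∈ (sweep g cells seen vis ch).1) ∧
    (∀ x ∈ V₀, x ∈ (sweep g cells seen vis ch).2.1) := by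
  intro cells
  induction cells with
  | nil =>
    intro seen vis ch _ h2 h3 h4 h5
    exact ⟨h2, fun x hx => hx, h3, h4, h5⟩
  | cons c rest ih =>
    intro seen vis ch hc h2 h3 h4 h5
    obtain ⟨c1, c2, c3, c4, c5⟩ :=
      sweepNs_pres g v V₀ c (hc c List.mem_cons_self) (getNeighbors c g) seen vis ch
        (fun n hn => hn) h2 h3 h4 h5
    obtain ⟨d1, d2, d3, d4, d5⟩ :=
      ih (sweepNs (getNeighbors c g) seen vis ch).1 (sweepNs (getNeighbors c g) seen vis ch).2.1
        (sweepNs (getNeighbors c g) seen vis ch).2.2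
        (fun m hm => hc m (List.mem_cons_of_mem _ hm)) c1 c3 c4 c5
    exact ⟨d1, fun x hx => d2 x (c2 x hx), d3, d4, d5⟩

lemma saturate_spec (g : List (List String)) (v : Int × Int) (V₀ : List (Int × Int)) :
    ∀ (seen vis : List (Int × Int)),
    v ∈ seen → seen.Nodup → (∀ x ∈ seen, x = v ∨ Reach g v V₀ x) →
    (∀ x ∈ vis, x ∈ V₀ ∨ x ∈ seen) → (∀ x ∈ V₀, x ∈ vis) →
    (saturate g seen vis).1.Nodup ∧
    v ∈ (saturate g seen vis).1 ∧
    (∀ x ∈ (saturate g seen vis).1, x = v ∨ Reach g v V₀ x) ∧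
    (∀ x ∈ (saturate g seen vis).1, ∀ n ∈ getNeighbors x g, n ∈ V₀ ∨ n ∈ (saturate g seen vis).1) := by
  intro seen vis
  fun_induction saturate g seen vis with
  | case1 seen vis hch ih =>
    intro h1 h2 h3 h4 h5
    obtain ⟨c1, c2, c3, c4, c5⟩ := sweep_pres g v V₀ seen seen vis false h3 h2 h3 h4 h5
    exact ih (c2 v h1) c1 c3 c4 c5
  | case2 seen vis hch =>
    intro h1 h2 h3 h4 h5
    have hch' : (sweep g seen seen vis false).2.2 = false := by simpa using hch
    obtain ⟨e1, e2, e3⟩ := sweep_nochange g seen seen vis hch'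
    simp only [e1]
    refine ⟨h2, h1, h3, fun x hx n hn => ?_⟩
    rcases e3 x hx n hn with h | h
    · exact Or.inr h
    · rcases h4 n h with h' | h'
      · exact Or.inl h'
      · exact Or.inr h'

lemma reach_mem (g : List (List String)) (v : Int × Int) (V₀ D : List (Int × Int))
    (hv : v ∈ D) (hcl : ∀ x ∈ D, ∀ n ∈ getNeighbors x g, n ∈ V₀ ∨ n ∈ D) :
    ∀ x, Reach g v V₀ x → x ∈ D := by
  intro x h
  induction h with
  | base n hn hnV => rcases hcl v hv n hn with h | h
                     · exact absurd h hnV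
                     · exact h
  | step c n _ hn hnV ih => rcases hcl c ih n hn with h | h
                            · exact absurd h hnV
                            · exact h

-- ===== VERDICT (by name: the statement is the Claim_ definition above) =====
theorem bfs_spec : Claim_equal_bfs := by
  intro g v V₀ _hdom
  unfold Spec_bfs bfs bfs_alt
  have hd0 : ∀ x, x ∈ PySem.Set.ofList [v] ↔ x = v := by
    intro x; rw [PySem.Set.mem_ofList]; simp
  obtain ⟨A1, A2, A3, A4⟩ := bfsLoop_spec g v V₀ [v] (PySem.Set.ofList [v]) V₀
    (fun x hx => (hd0 x).2 (by simpa using hx))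
    (PySem.Set.nodup_ofList _)
    (fun x hx => Or.inl ((hd0 x).1 hx))
    (fun x hx => Or.inl hx)
    (fun x hx => hx)
    (fun x hx => Or.inl (by simp [(hd0 x).1 hx]))
  have hvA : v ∈ bfsLoop g [v] (PySem.Set.ofList [v]) V₀ := A2 v ((hd0 v).2 rfl)
  have charA : ∀ x, x ∈ bfsLoop g [v] (PySem.Set.ofList [v]) V₀ ↔ (x = v ∨ Reach g v V₀ x) := by
    intro x
    constructor
    · exact A3 x
    · rintro (rfl | h)
      · exact hvA
      · exact reach_mem g v V₀ _ hvA A4 x h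
  obtain ⟨B1, B2, B3, B4⟩ := saturate_spec g v V₀ (PySem.Set.ofList [v]) V₀
    ((hd0 v).2 rfl)
    (PySem.Set.nodup_ofList _)
    (fun x hx => Or.inl ((hd0 x).1 hx))
    (fun x hx => Or.inl hx)
    (fun x hx => hx)
  have charB : ∀ x, x ∈ (saturate g (PySem.Set.ofList [v]) V₀).1 ↔ (x = v ∨ Reach g v V₀ x) := by
    intro x
    constructor
    · exact B3 x
    · rintro (rfl | h)
      · exact B2
      · exact reach_mem g v V₀ _ B2 B4 x h
  have hmemiff : ∀ x, x ∈ bfsLoop g [v] (PySem.Set.ofList [v]) V₀ ↔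
      x ∈ (saturate g (PySem.Set.ofList [v]) V₀).1 := by
    intro x; rw [charA x, charB x]
  have hlen : (bfsLoop g [v] (PySem.Set.ofList [v]) V₀).length
      = (saturate g (PySem.Set.ofList [v]) V₀).1.length :=
    ((List.perm_ext_iff_of_nodup A1 B1).2 hmemiff).length_eq
  rw [hlen]
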